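-- pv_equiv track=rewrite | github.com/tornado404/psfa-2022 | scripts/neural_render/utils.py | fetch_list
-- ===== SOURCE A (Python) =====
-- from typing import Any, Dict, List, Optional, Union
--
-- def fetch_list(data: List[Any], i: int, j: int, static_frame: Optional[int]):
--     assert j > i
--     n_frames = len(data)
--     if static_frame is not None:
--         # use static frame
--         k = static_frame % n_frames
--         return [data[k] for _ in range(n_frames)]
--     else:
--         # use dynamic frames, bounce at boundary
--         new_list = []
--         for k in range(i, j):
--             # make sure the direction
--             d = k // n_frames
--             if d % 2 == 0:  # increasing direction
--                 k = k % n_frames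
--             else:  # decreasing direction
--                 k = (n_frames - 1) - (k % n_frames)
--             new_list.append(data[k])
--         return new_list
-- ===== SOURCE B (Python) =====
-- def fetch_list(data, i, j, static_frame):
--     assert j > i
--     n_frames = len(data)
--     if static_frame is not None:
--         # use static frame
--         k = static_frame % n_frames
--         return [data[k] for _ in range(n_frames)]
--     else:
--         # dynamic frames: precompute one full bounce period (forward then backward)
--         # and read the triangle wave off the table instead of recomputing parity.
--         period = list(range(n_frames)) + list(range(n_frames - 1, -1, -1))
--         m = 2 * n_frames
--         return [data[period[k % m]] for k in range(i, j)]
-- ===== Notes on version B (the rewrite author's own statement) =====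
-- stated objective: alternative
-- what changed: The dynamic branch precomputes a length-2n bounce-period lookup table (forward indices then reversed) and maps each k to data[period[k % 2n]], replacing A's per-element floor-division/parity branching.
import Mathlib
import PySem

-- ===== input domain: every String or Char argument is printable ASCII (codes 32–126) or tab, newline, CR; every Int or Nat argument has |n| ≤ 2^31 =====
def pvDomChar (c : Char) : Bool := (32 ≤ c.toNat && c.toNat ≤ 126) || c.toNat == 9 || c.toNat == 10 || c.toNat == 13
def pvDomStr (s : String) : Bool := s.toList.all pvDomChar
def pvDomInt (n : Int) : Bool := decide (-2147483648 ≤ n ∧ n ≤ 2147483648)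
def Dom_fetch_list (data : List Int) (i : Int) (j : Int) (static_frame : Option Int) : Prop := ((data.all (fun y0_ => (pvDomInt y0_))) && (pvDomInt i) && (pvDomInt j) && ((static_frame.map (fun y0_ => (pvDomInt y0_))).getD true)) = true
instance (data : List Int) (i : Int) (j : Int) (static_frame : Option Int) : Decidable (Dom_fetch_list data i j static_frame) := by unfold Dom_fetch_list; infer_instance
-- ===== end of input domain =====

-- B replaces the dynamic branch's per-element floordiv/parity arithmetic with a precomputed
-- length-2n bounce-period lookup table; the static branch is unchanged. Same cost, alternative structure.

-- ===== PORT A =====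
def fetch_list (data : List Int) (i : Int) (j : Int) (static_frame : Option Int) : List Int :=
  let n_frames : Int := (data.length : Int)
  match static_frame with
  | some s =>
      let k := PySem.Int.mod s n_frames
      (PySem.List.pyRange 0 n_frames 1).map (fun _ => PySem.List.pyGetD data k 0)
  | none =>
      (PySem.List.pyRange i j 1).foldl (fun new_list k =>
        let d := PySem.Int.floordiv k n_frames
        let k' := if PySem.Int.mod d 2 = 0 then PySem.Int.mod k n_frames
                  else (n_frames - 1) - PySem.Int.mod k n_frames
        new_list ++ [PySem.List.pyGetD data k' 0]) []

-- ===== PORT B =====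
def fetch_list_alt (data : List Int) (i : Int) (j : Int) (static_frame : Option Int) : List Int :=
  let n_frames : Int := (data.length : Int)
  match static_frame with
  | some s =>
      let k := PySem.Int.mod s n_frames
      (PySem.List.pyRange 0 n_frames 1).map (fun _ => PySem.List.pyGetD data k 0)
  | none =>
      let period := PySem.List.pyRange 0 n_frames 1 ++ PySem.List.pyRange (n_frames - 1) (-1) (-1)
      let m := 2 * n_frames
      (PySem.List.pyRange i j 1).map (fun k =>
        PySem.List.pyGetD data (PySem.List.pyGetD period (PySem.Int.mod k m) 0) 0)

-- ===== PRECONDITION & SPEC =====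
-- Pre_ excludes exactly where Python A raises: j ≤ i (AssertionError) and empty data (ZeroDivisionError from % / //).
def Pre_fetch_list (data : List Int) (i : Int) (j : Int) (static_frame : Option Int) : Prop :=
  i < j ∧ data ≠ []
instance (data : List Int) (i : Int) (j : Int) (static_frame : Option Int) : Decidable (Pre_fetch_list data i j static_frame) := by unfold Pre_fetch_list; infer_instance
def pvWitness_fetch_list : List Int × Int × Int × Option Int := ([4, 7, 9], 0, 8, none)

def Spec_fetch_list (data : List Int) (i : Int) (j : Int) (static_frame : Option Int) (out : List Int) : Prop := out = fetch_list_alt data i j static_frame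
instance (data : List Int) (i : Int) (j : Int) (static_frame : Option Int) (out : List Int) : Decidable (Spec_fetch_list data i j static_frame out) := by unfold Spec_fetch_list; infer_instance

-- ===== CLAIM (what is proved, stated in full; the proofs are below) =====
def Claim_equal_fetch_list : Prop := ∀ (data : List Int) (i : Int) (j : Int) (static_frame : Option Int), Dom_fetch_list data i j static_frame → Pre_fetch_list data i j static_frame → Spec_fetch_list data i j static_frame (fetch_list data i j static_frame)

-- ===== LEMMAS AND PROOFS =====

-- The bounce-period table read at k % (2n) equals A's parity-based index.
theorem period_lookup_eq (n : Int) (hn : 0 < n) (k : Int) :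
    PySem.List.pyGetD (PySem.List.pyRange 0 n 1 ++ PySem.List.pyRange (n - 1) (-1) (-1))
      (PySem.Int.mod k (2 * n)) 0
    = (if PySem.Int.mod (PySem.Int.floordiv k n) 2 = 0 then PySem.Int.mod k n
       else (n - 1) - PySem.Int.mod k n) := by
  have h2n : (0 : Int) < 2 * n := by omega
  rw [PySem.Int.mod_eq_emod_of_pos h2n, PySem.Int.mod_eq_emod_of_pos hn,
      PySem.Int.floordiv_eq_ediv_of_pos hn,
      PySem.Int.mod_eq_emod_of_pos (show (0:Int) < 2 by norm_num)]
  set q2 := k / (2 * n) with hq2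
  set r := k % (2 * n) with hr
  have hk : r + 2 * n * q2 = k := Int.emod_add_mul_ediv k (2 * n)
  have hr0 : 0 ≤ r := Int.emod_nonneg k (by omega)
  have hrlt : r < 2 * n := Int.emod_lt_of_pos k h2n
  have hdm : k / n = 2 * q2 + (if r < n then 0 else 1) ∧
      k % n = (if r < n then r else r - n) := by
    rw [Int.ediv_emod_unique hn]
    refine ⟨?_, ?_, ?_⟩
    · split_ifs <;> linear_combination hk
    · split <;> omega
    · split <;> omega
  obtain ⟨hq, hm⟩ := hdm
  rw [hq, hm, PySem.List.pyRange_one, PySem.List.pyRange_neg_one]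
  have hget := PySem.List.pyGetD_eq_getElem
      ((List.range (n - 0).toNat).map (fun t : Nat => (0 : Int) + (t : Int)) ++
        (List.range (n - 1 - -1).toNat).map (fun t : Nat => n - 1 - (t : Int))) (0 : Int) hr0
      (by simp only [List.length_append, List.length_map, List.length_range]; omega)
  rw [hget]
  by_cases hcase : r < n
  · have hparity : (2 * q2 + (if r < n then 0 else 1)) % 2 = 0 := by
      rw [if_pos hcase]; omega
    rw [hparity, if_pos rfl, if_pos hcase]
    rw [List.getElem_append_left (by simp only [List.length_map, List.length_range]; omega),
        List.getElem_map, List.getElem_range]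
    omega
  · have hparity : ¬ (2 * q2 + (if r < n then 0 else 1)) % 2 = 0 := by
      rw [if_neg hcase]; omega
    rw [if_neg hparity, if_neg hcase]
    rw [List.getElem_append_right (by simp only [List.length_map, List.length_range]; omega),
        List.getElem_map, List.getElem_range]
    simp only [List.length_map, List.length_range]
    omega

-- ===== VERDICT (by name: the statement is the Claim_ definition above) =====
theorem fetch_list_spec : Claim_equal_fetch_list := by
  intro data i j static_frame _ hpre
  obtain ⟨hij, hne⟩ := hpre
  have hn : (0 : Int) < (data.length : Int) := by
    have : data.length ≠ 0 := by simpa using hne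
    omega
  unfold Spec_fetch_list
  cases static_frame with
  | some s => rfl
  | none =>
      show (PySem.List.pyRange i j 1).foldl (fun new_list k =>
            new_list ++ [PySem.List.pyGetD data
              (if PySem.Int.mod (PySem.Int.floordiv k (data.length : Int)) 2 = 0
               then PySem.Int.mod k (data.length : Int)
               else ((data.length : Int) - 1) - PySem.Int.mod k (data.length : Int)) 0]) []
          = (PySem.List.pyRange i j 1).map (fun k =>
              PySem.List.pyGetD data
                (PySem.List.pyGetD (PySem.List.pyRange 0 (data.length : Int) 1 ++
                  PySem.List.pyRange ((data.length : Int) - 1) (-1) (-1))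
                  (PySem.Int.mod k (2 * (data.length : Int))) 0) 0)
      rw [PySem.List.foldl_append_singleton_eq_map, List.nil_append]
      apply List.map_congr_left
      intro k _
      rw [period_lookup_eq _ hn k]
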